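-- pv_equiv track=rewrite | github.com/pwmcclung/codeProbs | pickaxe.py | stone_pick
-- ===== SOURCE A (Python) =====
-- import math
--
-- def stone_pick(arr):
--     handle = 0
--     head = 0
--     for x in arr:
--         if x  == 'Sticks':
--             handle += 1
--         if x == 'Wood':
--             handle += 4
--         if x == 'Cobblestone':
--             head += 1
--     ttl_heads = round(head//3)
--     ttl_handles = round(handle//2)
--     pick_axes = 0
--     if ttl_heads == 0 or ttl_handles == 0:
--         return 0
--     else:
--         while ttl_heads >=1 and ttl_handles >=1:
--             ttl_heads -= 1
--             ttl_handles -= 1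
--             pick_axes += 1
--     return math.floor(pick_axes)
-- ===== SOURCE B (Python) =====
-- def stone_pick(arr):
--     handle = arr.count('Sticks') + 4 * arr.count('Wood')
--     head = arr.count('Cobblestone')
--     return min(head // 3, handle // 2)
-- ===== Notes on version B (the rewrite author's own statement) =====
-- stated objective: simpler
-- what changed: Replaces the fused branching loop plus zero-guard and decrement while-loop with three list.count passes and a direct min(head // 3, handle // 2).
import Mathlib
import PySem

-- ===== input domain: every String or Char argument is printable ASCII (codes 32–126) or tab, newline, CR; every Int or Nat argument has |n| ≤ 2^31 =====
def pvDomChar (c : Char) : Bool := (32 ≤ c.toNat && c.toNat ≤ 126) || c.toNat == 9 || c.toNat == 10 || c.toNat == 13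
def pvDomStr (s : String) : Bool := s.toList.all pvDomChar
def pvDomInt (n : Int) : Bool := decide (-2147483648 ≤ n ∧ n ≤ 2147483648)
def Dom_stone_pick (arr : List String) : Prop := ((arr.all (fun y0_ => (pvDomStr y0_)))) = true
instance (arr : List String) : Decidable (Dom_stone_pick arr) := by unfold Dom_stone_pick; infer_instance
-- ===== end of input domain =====

-- B replaces A's fused branching loop, zero-guard and decrement while-loop by three count passes and min(head // 3, handle // 2); objective: simpler.


-- ===== PORT A =====
-- the while-loop: while ttl_heads >= 1 and ttl_handles >= 1: decrement both, pick_axes += 1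
def pickLoop (h t p : Int) : Int :=
  if 1 ≤ h ∧ 1 ≤ t then pickLoop (h - 1) (t - 1) (p + 1) else p
termination_by h.toNat
decreasing_by omega

def stone_pick (arr : List String) : Int :=
  let st := arr.foldl (fun (st : Int × Int) x =>
    let st := if x == "Sticks" then (st.1 + 1, st.2) else st
    let st := if x == "Wood" then (st.1 + 4, st.2) else st
    if x == "Cobblestone" then (st.1, st.2 + 1) else st) (0, 0)
  let ttl_heads := PySem.Int.floordiv st.2 3    -- round(int) = int
  let ttl_handles := PySem.Int.floordiv st.1 2
  if ttl_heads = 0 ∨ ttl_handles = 0 then 0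
  else pickLoop ttl_heads ttl_handles 0         -- math.floor(int) = int

-- ===== PORT B =====
def stone_pick_alt (arr : List String) : Int :=
  let handle : Int := (PySem.List.count arr "Sticks" : Int) + 4 * (PySem.List.count arr "Wood" : Int)
  let head : Int := (PySem.List.count arr "Cobblestone" : Int)
  min (PySem.Int.floordiv head 3) (PySem.Int.floordiv handle 2)

-- ===== PRECONDITION & SPEC =====
def Spec_stone_pick (arr : List String) (out : Int) : Prop := out = stone_pick_alt arr
instance (arr : List String) (out : Int) : Decidable (Spec_stone_pick arr out) := by unfold Spec_stone_pick; infer_instance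

-- ===== CLAIM (what is proved, stated in full; the proofs are below) =====
def Claim_equal_stone_pick : Prop := ∀ (arr : List String), Dom_stone_pick arr → Spec_stone_pick arr (stone_pick arr)

-- ===== LEMMAS AND PROOFS =====
theorem pickLoop_eq (h t p : Int) (hh : 0 ≤ h) (ht : 0 ≤ t) :
    pickLoop h t p = p + min h t := by
  induction h, t, p using pickLoop.induct with
  | case1 h t p hc ih =>
      rw [pickLoop, if_pos hc, ih (by omega) (by omega)]
      omega
  | case2 h t p hc =>
      rw [pickLoop, if_neg hc]
      omega

theorem foldl_counts (arr : List String) (s h : Int) :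
    arr.foldl (fun (st : Int × Int) x =>
      let st := if x == "Sticks" then (st.1 + 1, st.2) else st
      let st := if x == "Wood" then (st.1 + 4, st.2) else st
      if x == "Cobblestone" then (st.1, st.2 + 1) else st) (s, h)
    = (s + (arr.count "Sticks" : Int) + 4 * (arr.count "Wood" : Int),
       h + (arr.count "Cobblestone" : Int)) := by
  induction arr generalizing s h with
  | nil => simp
  | cons x xs ih =>
      simp only [List.foldl_cons, List.count_cons]
      by_cases h1 : x = "Sticks" <;> by_cases h2 : x = "Wood" <;> by_cases h3 : x = "Cobblestone" <;>
        simp_all <;> omega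

-- ===== VERDICT (by name: the statement is the Claim_ definition above) =====
theorem stone_pick_spec : Claim_equal_stone_pick := by
  intro arr _
  unfold Spec_stone_pick stone_pick stone_pick_alt PySem.List.count
  simp only [foldl_counts]
  have e3 : ∀ a : Int, PySem.Int.floordiv a 3 = a / 3 :=
    fun a => PySem.Int.floordiv_eq_ediv_of_pos (by norm_num)
  have e2 : ∀ a : Int, PySem.Int.floordiv a 2 = a / 2 :=
    fun a => PySem.Int.floordiv_eq_ediv_of_pos (by norm_num)
  simp only [e3, e2]
  have h1 : (0:Int) ≤ (arr.count "Cobblestone" : Int) := by positivity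
  have h2 : (0:Int) ≤ (arr.count "Sticks" : Int) + 4 * (arr.count "Wood" : Int) := by positivity
  split_ifs with hz
  · omega
  · rw [pickLoop_eq _ _ _ (by omega) (by omega)]
    omega
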